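-- pv_equiv track=rewrite | github.com/PizzaYolodu74/OCR | matrix_cutting.py | wipe_vertical
-- ===== SOURCE A (Python) =====
-- def create_histogram(nb):
--     H = []
--     for i in range(nb):
--         H.append(0)
--     return H
--
-- def wipe_vertical(M):
--     (l, l0) = (len(M), len(M[0]))
--     HV = create_histogram(l0)
--     for col in range(l0):
--         for line in range(l):
--             HV[col] += (M[line][col] // 255)
--
--     i = 0
--     l0max = l0
--     # Search white column at the beginning
--     while i < l0max and HV[i] == l:
--         i += 1
--         l0 -= 1
--         for j in range(l):
--             M[j].pop(0)
--
--     if i == l0max: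
--         return None
--
--     l0max -= 1
--     # Search white column at the end
--     while l0max > i and HV[l0max] == l:
--         for j in range(l):
--             M[j].pop()
--         l0max -= 1
--
--     return M
-- ===== SOURCE B (Python) =====
-- # Lazy rewrite: instead of A's full histogram plus destructive column-popping, B tests
-- # column whiteness lazily from each end (stopping at the first non-white column) and
-- # slices each row once.
-- # Note: A mutates M in place (pops columns); B does not — equivalence is about the return value only.
-- def wipe_vertical(M):
--     l = len(M)
--     l0 = len(M[0])
--
--     def white(c):
--         return sum(row[c] // 255 for row in M) == l
--
--     i = 0
--     while i < l0 and white(i):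
--         i += 1
--     if i == l0:
--         return None
--     k = 0
--     while k < l0 - 1 - i and white(l0 - 1 - k):
--         k += 1
--     return [row[i:len(row) - k] for row in M]
-- ===== Notes on version B (the rewrite author's own statement) =====
-- stated objective: faster
-- what changed: B drops A's full histogram and destructive column-popping (each pop(0) shifts every row): it tests column whiteness lazily from each end, stopping at the first non-white column, and slices each row once.
import Mathlib
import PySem

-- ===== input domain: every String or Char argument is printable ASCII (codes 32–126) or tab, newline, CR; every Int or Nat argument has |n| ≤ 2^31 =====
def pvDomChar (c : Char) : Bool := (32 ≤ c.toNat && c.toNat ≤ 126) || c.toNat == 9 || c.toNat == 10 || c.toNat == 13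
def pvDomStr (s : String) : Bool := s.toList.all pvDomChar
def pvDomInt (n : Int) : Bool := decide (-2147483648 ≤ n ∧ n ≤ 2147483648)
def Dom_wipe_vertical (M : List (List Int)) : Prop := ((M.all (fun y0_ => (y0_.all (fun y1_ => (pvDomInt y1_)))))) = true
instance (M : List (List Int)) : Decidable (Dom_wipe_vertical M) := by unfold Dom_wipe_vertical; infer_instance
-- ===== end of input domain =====

-- B computes the per-column white flags in one pass and slices each row once instead of
-- repeatedly popping columns; equivalence is about the RETURN value only (A mutates M in place, B does not).

-- ===== PORT A =====
def create_histogram (nb : Int) : List Int :=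
  (PySem.List.pyRange 0 nb).foldl (fun H _i => H ++ [(0 : Int)]) []

-- inner 'for line in range(l): HV[col] += M[line][col] // 255'
-- (M[line] and HV[col] are always in range — loop indices — so the total pyGetD/pySetD are exact;
--  M[line][col] can raise IndexError, hence pyGet?)
def pvInner (M : List (List Int)) (l col : Int) (HV : List Int) : Option (List Int) :=
  (PySem.List.pyRange 0 l).foldlM
    (fun HV line =>
      match PySem.List.pyGet? (PySem.List.pyGetD M line []) col with
      | none => none
      | some v => some (PySem.List.pySetD HV col
          (PySem.List.pyGetD HV col 0 + PySem.Int.floordiv v 255)))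
    HV

def pvHVGo (M : List (List Int)) (l : Int) (a b : Int) (HV : List Int) : Option (List Int) :=
  (PySem.List.pyRange a b).foldlM (fun HV col => pvInner M l col HV) HV

-- 'for j in range(l): M[j].pop(0)'  (generalised start index for the proofs; the port uses a = 0)
def pvPopFrontsGo (a b : Int) (M : List (List Int)) : Option (List (List Int)) :=
  (PySem.List.pyRange a b).foldlM
    (fun Mm j =>
      match PySem.List.pop? (PySem.List.pyGetD Mm j []) 0 with
      | none => none
      | some p => some (PySem.List.pySetD Mm j p.2))
    M

-- 'for j in range(l): M[j].pop()'
def pvPopBacksGo (a b : Int) (M : List (List Int)) : Option (List (List Int)) :=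
  (PySem.List.pyRange a b).foldlM
    (fun Mm j =>
      match PySem.List.pop? (PySem.List.pyGetD Mm j []) with
      | none => none
      | some p => some (PySem.List.pySetD Mm j p.2))
    M

-- 'while i < l0max and HV[i] == l: i += 1; l0 -= 1; <pop fronts>'  (HV[i] is in range whenever read)
def pvLoop1 (HV : List Int) (l l0max : Int) (i l0 : Int) (M : List (List Int)) :
    Option (Int × Int × List (List Int)) :=
  if _h : i < l0max ∧ PySem.List.pyGetD HV i 0 = l then
    match pvPopFrontsGo 0 l M with
    | none => none
    | some M' => pvLoop1 HV l l0max (i + 1) (l0 - 1) M'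
  else some (i, l0, M)
termination_by (l0max - i).toNat
decreasing_by omega

-- 'while l0max > i and HV[l0max] == l: <pop backs>; l0max -= 1'
def pvLoop2 (HV : List Int) (l i : Int) (l0max : Int) (M : List (List Int)) :
    Option (Int × List (List Int)) :=
  if _h : i < l0max ∧ PySem.List.pyGetD HV l0max 0 = l then
    match pvPopBacksGo 0 l M with
    | none => none
    | some M' => pvLoop2 HV l i (l0max - 1) M'
  else some (l0max, M)
termination_by (l0max - i).toNat
decreasing_by omega

def wipe_vertical (M : List (List Int)) : Option (List (List Int)) :=
  match PySem.List.pyGet? M 0 with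
  | none => none                                  -- M[0] raises IndexError (outside Pre_)
  | some row0 =>
    let l : Int := M.length
    let l0 : Int := row0.length
    match pvHVGo M l 0 l0 (create_histogram l0) with
    | none => none                                -- M[line][col] raised (outside Pre_)
    | some HV =>
      match pvLoop1 HV l l0 0 l0 M with
      | none => none
      | some (i, _l0cur, M1) =>
        if i = l0 then none                       -- Python 'return None'
        else
          match pvLoop2 HV l i (l0 - 1) M1 with
          | none => none
          | some (_, M2) => some M2

-- ===== PORT B =====
-- 'sum(row[c] // 255 for row in M)'
def pvColSum (M : List (List Int)) (c : Int) : Option Int :=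
  M.foldlM
    (fun s row =>
      match PySem.List.pyGet? row c with
      | none => none
      | some v => some (s + PySem.Int.floordiv v 255))
    0

-- 'def white(c): return sum(row[c] // 255 for row in M) == l'
def pvWhiteAt (M : List (List Int)) (l c : Int) : Option Bool :=
  match pvColSum M c with
  | none => none
  | some s => some (decide (s = l))

-- 'i = 0; while i < l0 and white(i): i += 1'
def pvAltLead (M : List (List Int)) (l l0 : Int) (i : Int) : Option Int :=
  if _h : i < l0 then
    match pvWhiteAt M l i with
    | none => none
    | some true => pvAltLead M l l0 (i + 1)
    | some false => some i
  else some i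
termination_by (l0 - i).toNat
decreasing_by omega

-- 'k = 0; while k < l0 - 1 - i and white(l0 - 1 - k): k += 1'
def pvAltTrail (M : List (List Int)) (l bound l0 : Int) (k : Int) : Option Int :=
  if _h : k < bound then
    match pvWhiteAt M l (l0 - 1 - k) with
    | none => none
    | some true => pvAltTrail M l bound l0 (k + 1)
    | some false => some k
  else some k
termination_by (bound - k).toNat
decreasing_by omega

def wipe_vertical_alt (M : List (List Int)) : Option (List (List Int)) :=
  match PySem.List.pyGet? M 0 with
  | none => none
  | some row0 =>
    let l : Int := M.length
    let l0 : Int := row0.length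
    match pvAltLead M l l0 0 with
    | none => none
    | some i =>
      if i = l0 then none
      else
        match pvAltTrail M l (l0 - 1 - i) l0 0 with
        | none => none
        | some k =>
          some (M.map (fun row =>
            PySem.List.slice row (some i) (some ((row.length : Int) - k))))

-- ===== PRECONDITION & SPEC =====
-- Pre_ excludes exactly the inputs where A raises IndexError: the empty matrix (M[0]),
-- and matrices with a row shorter than the first row (M[line][col] in the histogram pass).
def Pre_wipe_vertical (M : List (List Int)) : Prop :=
  M ≠ [] ∧ ∀ row ∈ M, M.headI.length ≤ row.length
instance (M : List (List Int)) : Decidable (Pre_wipe_vertical M) := by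
  unfold Pre_wipe_vertical; infer_instance

def pvWitness_wipe_vertical : List (List Int) := [[0, 255], [255, 0]]

def Spec_wipe_vertical (M : List (List Int)) (out : Option (List (List Int))) : Prop := out = wipe_vertical_alt M
instance (M : List (List Int)) (out : Option (List (List Int))) : Decidable (Spec_wipe_vertical M out) := by unfold Spec_wipe_vertical; infer_instance

-- ===== CLAIM (what is proved, stated in full; the proofs are below) =====
def Claim_equal_wipe_vertical : Prop := ∀ (M : List (List Int)), Dom_wipe_vertical M → Pre_wipe_vertical M → Spec_wipe_vertical M (wipe_vertical M)

-- ===== LEMMAS AND PROOFS =====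

-- per-column sum, the common value both sides compute
def pvS (M : List (List Int)) (c : Int) : Int :=
  (M.map (fun row => PySem.Int.floordiv (PySem.List.pyGetD row c 0) 255)).sum

def pvSN (M : List (List Int)) (c : Nat) : Int := pvS M (c : Int)

def pvFlags (M : List (List Int)) (lv : Int) (n : Nat) : List Bool :=
  (List.range n).map (fun c => decide (pvSN M c = lv))

-- number of loop-1 iterations
def pvRunUp (HV : List Int) (lv : Int) (n i : Nat) : Nat :=
  if _h : i < n ∧ HV.getD i 0 = lv then pvRunUp HV lv n (i + 1) + 1 else 0
termination_by n - i
decreasing_by omega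

-- number of loop-2 iterations
def pvRunDn (HV : List Int) (lv : Int) (i : Nat) (m : Nat) : Nat :=
  if _h : i < m ∧ HV.getD m 0 = lv then pvRunDn HV lv i (m - 1) + 1 else 0
termination_by m
decreasing_by omega

theorem pvFoldlM_some {α β : Type} (f : β → α → Option β) (g : β → α → β) :
    ∀ (xs : List α) (init : β), (∀ x ∈ xs, ∀ acc, f acc x = some (g acc x)) →
      xs.foldlM f init = some (xs.foldl g init) := by
  intro xs
  induction xs with
  | nil => intro init h; rfl
  | cons x xs ih =>
    intro init h
    rw [List.foldlM_cons, h x (by simp)]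
    simp only [List.foldl_cons]
    exact ih _ (fun y hy acc => h y (by simp [hy]) acc)

theorem pvHist (n : Nat) : create_histogram ((n : Nat) : Int) = List.replicate n (0 : Int) := by
  unfold create_histogram
  rw [PySem.List.foldl_append_singleton_eq_map (fun _ => (0 : Int))]
  simp [List.map_const', PySem.List.length_pyRange_one]

theorem pvInnerPure (c : Nat) :
    ∀ (M : List (List Int)) (HV : List Int), c < HV.length →
      M.foldl (fun HV row =>
          HV.set c (HV.getD c 0 + PySem.Int.floordiv (row.getD c 0) 255)) HV
        = HV.set c (HV.getD c 0 + pvS M ((c : Nat) : Int)) := by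
  intro M
  induction M with
  | nil =>
    intro HV hc
    simp only [List.foldl_nil, pvS, List.map_nil, List.sum_nil, add_zero]
    rw [List.getD_eq_getElem HV 0 hc]
    exact (List.set_getElem_self hc).symm
  | cons r M ih =>
    intro HV hc
    simp only [List.foldl_cons]
    rw [ih _ (by simpa using hc), List.set_set]
    congr 1
    rw [List.getD_eq_getElem _ 0 (by simpa using hc), List.getElem_set_self (by simpa using hc)]
    simp [pvS]
    ring

theorem pvInner_spec (M : List (List Int)) (c : Nat) (HV : List Int)
    (hrows : ∀ row ∈ M, c < row.length) (hc : c < HV.length) :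
    pvInner M ((M.length : Nat) : Int) ((c : Nat) : Int) HV
      = some (HV.set c (HV.getD c 0 + pvS M (c : Int))) := by
  unfold pvInner
  have hlen : ((M.length : Nat) : Int) = PySem.List.len M := by
    simp [PySem.List.len_eq]
  rw [hlen]
  rw [pvFoldlM_some _
    (fun HV line => PySem.List.pySetD HV ((c : Nat) : Int)
      (PySem.List.pyGetD HV ((c : Nat) : Int) 0
        + PySem.Int.floordiv (PySem.List.pyGetD (PySem.List.pyGetD M line []) ((c : Nat) : Int) 0) 255))
    _ _ ?step]
  · congr 1
    rw [PySem.List.foldl_pyRange_pyGetD M []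
      (fun HV row => PySem.List.pySetD HV ((c : Nat) : Int)
        (PySem.List.pyGetD HV ((c : Nat) : Int) 0
          + PySem.Int.floordiv (PySem.List.pyGetD row ((c : Nat) : Int) 0) 255)) HV (le_refl 0)]
    simp only [Int.toNat_zero, List.drop_zero, PySem.List.pySetD_natCast, PySem.List.pyGetD_natCast]
    rw [pvInnerPure c M HV hc]
  · intro line hline acc
    have hmem := (PySem.List.mem_pyRange_one).mp (by simpa [PySem.List.len_eq] using hline)
    have h0 : (0 : Int) ≤ line := hmem.1
    have h1 : line < (M.length : Int) := by simpa [PySem.List.len_eq] using hmem.2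
    have hrow : PySem.List.pyGetD M line [] = M[line.toNat]'(by omega) :=
      PySem.List.pyGetD_eq_getElem M [] h0 (by exact_mod_cast h1)
    have hrm : M[line.toNat]'(by omega) ∈ M := List.getElem_mem _
    have hcr : c < (M[line.toNat]'(by omega)).length := hrows _ hrm
    rw [hrow, PySem.List.pyGet?_natCast, List.getElem?_eq_getElem hcr]
    simp only [hrow, PySem.List.pyGetD_natCast]
    rw [List.getD_eq_getElem _ 0 hcr]

theorem pvHVGo_spec (M : List (List Int)) (n : Nat) (hrows : ∀ row ∈ M, n ≤ row.length) :
    ∀ (m : Nat), m ≤ n →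
      pvHVGo M ((M.length : Nat) : Int) ((m : Nat) : Int) ((n : Nat) : Int)
          ((List.range m).map (pvSN M) ++ List.replicate (n - m) 0)
        = some ((List.range n).map (pvSN M)) := by
  have key : ∀ (k : Nat) (m : Nat), m ≤ n → n - m = k →
      pvHVGo M ((M.length : Nat) : Int) ((m : Nat) : Int) ((n : Nat) : Int)
          ((List.range m).map (pvSN M) ++ List.replicate (n - m) 0)
        = some ((List.range n).map (pvSN M)) := by
    intro k
    induction k with
    | zero =>
      intro m hm hk
      have hmn : m = n := by omega
      subst hmn
      unfold pvHVGo
      rw [PySem.List.pyRange_one_eq_nil (le_refl _)]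
      simp
    | succ k ih =>
      intro m hm hk
      have hmn : m < n := by omega
      unfold pvHVGo
      rw [PySem.List.pyRange_one_cons (by exact_mod_cast hmn)]
      rw [List.foldlM_cons]
      have hlenHV : m < ((List.range m).map (pvSN M) ++ List.replicate (n - m) 0).length := by
        simp; omega
      rw [pvInner_spec M m _ (fun row hr => lt_of_lt_of_le hmn (hrows row hr)) hlenHV]
      have hgd : ((List.range m).map (pvSN M) ++ List.replicate (n - m) 0).getD m 0 = 0 := by
        rw [List.getD_append_right _ _ _ _ (by simp)]
        simp
      have hset : ((List.range m).map (pvSN M) ++ List.replicate (n - m) 0).set m (0 + pvS M (m : Int))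
          = (List.range (m + 1)).map (pvSN M) ++ List.replicate (n - (m + 1)) 0 := by
        rw [List.set_append]
        rw [if_neg (by simp)]
        have hrepl : n - m = k + 1 := hk
        rw [hrepl, List.replicate_succ]
        have hlm : ((List.range m).map (pvSN M)).length = m := by simp
        rw [hlm, Nat.sub_self, List.set_cons_zero]
        have hk2 : n - (m + 1) = k := by omega
        simp [List.range_succ, hk2, pvSN]
      rw [hgd, hset]
      have hrest := ih (m + 1) (by omega) (by omega)
      unfold pvHVGo at hrest
      have hcast : ((m : Int) + 1) = (((m + 1 : Nat)) : Int) := by push_cast; ring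
      rw [hcast]
      simpa using hrest
  intro m hm
  exact key (n - m) m hm rfl

theorem pvPopFronts_spec :
    ∀ (Q P : List (List Int)), (∀ row ∈ Q, row ≠ []) →
      pvPopFrontsGo ((P.length : Nat) : Int) (((P.length + Q.length : Nat)) : Int) (P ++ Q)
        = some (P ++ Q.map (fun r => r.drop 1)) := by
  intro Q
  induction Q with
  | nil =>
    intro P hQ
    unfold pvPopFrontsGo
    rw [PySem.List.pyRange_one_eq_nil (by simp)]
    simp
  | cons q Q ih =>
    intro P hQ
    have hne : q ≠ [] := hQ _ (by simp)
    unfold pvPopFrontsGo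
    rw [PySem.List.pyRange_one_cons (by push_cast [List.length_cons]; omega)]
    have hgd : PySem.List.pyGetD (P ++ q :: Q) ((P.length : Nat) : Int) [] = q := by
      rw [PySem.List.pyGetD_natCast, List.getD_append_right _ _ _ _ (le_refl _)]
      simp
    have hpop : PySem.List.pop? q 0 = some (q.head hne, q.tail) := by
      conv_lhs => rw [← List.cons_head_tail hne]
      exact PySem.List.pop?_zero_cons _ _
    have hset : PySem.List.pySetD (P ++ q :: Q) ((P.length : Nat) : Int) q.tail
        = (P ++ [q.tail]) ++ Q := by
      rw [PySem.List.pySetD_natCast, List.set_append, if_neg (by omega), Nat.sub_self,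
        List.set_cons_zero]
      simp
    rw [List.foldlM_cons, hgd, hpop]
    have hrest := ih (P ++ [q.tail]) (fun r hr => hQ r (by simp [hr]))
    unfold pvPopFrontsGo at hrest
    have hb : ((P.length : Int) + 1 + (Q.length : Int)) = (P.length : Int) + ((Q.length : Int) + 1) := by ring
    rw [show ((((P ++ [q.tail]).length + Q.length : Nat)) : Int) = (P.length : Int) + 1 + (Q.length : Int) from by push_cast [List.length_append]; simp] at hrest
    rw [hb] at hrest
    simpa [hset, List.drop_one] using hrest

theorem pvPopBacks_spec :
    ∀ (Q P : List (List Int)), (∀ row ∈ Q, row ≠ []) →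
      pvPopBacksGo ((P.length : Nat) : Int) (((P.length + Q.length : Nat)) : Int) (P ++ Q)
        = some (P ++ Q.map (fun r => r.dropLast)) := by
  intro Q
  induction Q with
  | nil =>
    intro P hQ
    unfold pvPopBacksGo
    rw [PySem.List.pyRange_one_eq_nil (by simp)]
    simp
  | cons q Q ih =>
    intro P hQ
    have hne : q ≠ [] := hQ _ (by simp)
    unfold pvPopBacksGo
    rw [PySem.List.pyRange_one_cons (by push_cast [List.length_cons]; omega)]
    have hgd : PySem.List.pyGetD (P ++ q :: Q) ((P.length : Nat) : Int) [] = q := by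
      rw [PySem.List.pyGetD_natCast, List.getD_append_right _ _ _ _ (le_refl _)]
      simp
    have hpop : PySem.List.pop? q = some (q.getLast hne, q.dropLast) := by
      conv_lhs => rw [← List.dropLast_append_getLast hne]
      exact PySem.List.pop?_last _ _
    have hset : PySem.List.pySetD (P ++ q :: Q) ((P.length : Nat) : Int) q.dropLast
        = (P ++ [q.dropLast]) ++ Q := by
      rw [PySem.List.pySetD_natCast, List.set_append, if_neg (by omega), Nat.sub_self,
        List.set_cons_zero]
      simp
    rw [List.foldlM_cons, hgd, hpop]
    have hrest := ih (P ++ [q.dropLast]) (fun r hr => hQ r (by simp [hr]))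
    unfold pvPopBacksGo at hrest
    have hb : ((P.length : Int) + 1 + (Q.length : Int)) = (P.length : Int) + ((Q.length : Int) + 1) := by ring
    rw [show ((((P ++ [q.dropLast]).length + Q.length : Nat)) : Int) = (P.length : Int) + 1 + (Q.length : Int) from by push_cast [List.length_append]; simp] at hrest
    rw [hb] at hrest
    simpa [hset] using hrest

theorem pvLoop1_spec (HV : List Int) (n : Nat) :
    ∀ (i : Nat) (l0 : Int) (Mc : List (List Int)), i ≤ n →
      (∀ row ∈ Mc, n - i ≤ row.length) →
      pvLoop1 HV ((Mc.length : Nat) : Int) ((n : Nat) : Int) ((i : Nat) : Int) l0 Mc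
        = some (((i + pvRunUp HV ((Mc.length : Nat) : Int) n i : Nat) : Int),
                l0 - (pvRunUp HV ((Mc.length : Nat) : Int) n i : Int),
                Mc.map (fun r => r.drop (pvRunUp HV ((Mc.length : Nat) : Int) n i))) := by
  have key : ∀ (k : Nat) (i : Nat) (l0 : Int) (Mc : List (List Int)), i ≤ n → n - i ≤ k →
      (∀ row ∈ Mc, n - i ≤ row.length) →
      pvLoop1 HV ((Mc.length : Nat) : Int) ((n : Nat) : Int) ((i : Nat) : Int) l0 Mc
        = some (((i + pvRunUp HV ((Mc.length : Nat) : Int) n i : Nat) : Int),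
                l0 - (pvRunUp HV ((Mc.length : Nat) : Int) n i : Int),
                Mc.map (fun r => r.drop (pvRunUp HV ((Mc.length : Nat) : Int) n i))) := by
    intro k
    induction k with
    | zero =>
      intro i l0 Mc hi hk hrows
      have hin : i = n := by omega
      rw [pvLoop1, dif_neg (by push_cast; omega), pvRunUp, dif_neg (by omega)]
      simp
    | succ k ih =>
      intro i l0 Mc hi hk hrows
      by_cases hcond : i < n ∧ HV.getD i 0 = ((Mc.length : Nat) : Int)
      · have hcondI : ((i : Nat) : Int) < ((n : Nat) : Int)
            ∧ PySem.List.pyGetD HV ((i : Nat) : Int) 0 = ((Mc.length : Nat) : Int) := by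
          constructor
          · exact_mod_cast hcond.1
          · rw [PySem.List.pyGetD_natCast]
            exact hcond.2
        rw [pvLoop1, dif_pos hcondI]
        have hne : ∀ row ∈ Mc, row ≠ [] := by
          intro row hr hemp
          have := hrows row hr
          rw [hemp] at this
          simp at this
          omega
        have hpf := pvPopFronts_spec Mc [] hne
        simp only [List.length_nil, List.nil_append, Nat.cast_zero, Nat.zero_add, zero_add] at hpf
        rw [hpf]
        have hrest := ih (i + 1) (l0 - 1) (Mc.map (fun r => r.drop 1)) (by omega) (by omega)
          (by
            intro row hr
            simp only [List.mem_map] at hr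
            obtain ⟨r, hrm, rfl⟩ := hr
            have := hrows r hrm
            simp
            omega)
        simp only [List.length_map] at hrest
        have hcast : ((i : Int) + 1) = (((i + 1 : Nat)) : Int) := by push_cast; ring
        rw [hcast]
        rw [pvRunUp, dif_pos hcond]
        refine Eq.trans hrest ?_
        simp only [Option.some.injEq, Prod.mk.injEq]
        refine ⟨by push_cast; ring, by push_cast; ring, ?_⟩
        rw [List.map_map]
        apply List.map_congr_left
        intro r _
        simp [List.drop_drop, Nat.add_comm]
      · have hcondI : ¬ (((i : Nat) : Int) < ((n : Nat) : Int)
            ∧ PySem.List.pyGetD HV ((i : Nat) : Int) 0 = ((Mc.length : Nat) : Int)) := by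
          rw [PySem.List.pyGetD_natCast]
          intro hc
          exact hcond ⟨by exact_mod_cast hc.1, hc.2⟩
        rw [pvLoop1, dif_neg hcondI, pvRunUp, dif_neg hcond]
        simp
  intro i l0 Mc hi hrows
  exact key (n - i) i l0 Mc hi (le_refl _) hrows

theorem pvLoop2_spec (HV : List Int) (lv : Int) (i : Nat) :
    ∀ (m : Nat) (Mc : List (List Int)), lv = ((Mc.length : Nat) : Int) →
      (∀ row ∈ Mc, m - i ≤ row.length) →
      pvLoop2 HV lv ((i : Nat) : Int) ((m : Nat) : Int) Mc
        = some ((((m - pvRunDn HV lv i m : Nat)) : Int),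
                Mc.map (fun r => r.take (r.length - pvRunDn HV lv i m))) := by
  intro m
  induction m with
  | zero =>
    intro Mc hlv hrows
    subst hlv
    rw [pvLoop2, dif_neg (by push_cast; omega), pvRunDn, dif_neg (by omega)]
    simp [List.take_length]
  | succ m ih =>
    intro Mc hlv hrows
    subst hlv
    by_cases hcond : i < m + 1 ∧ HV.getD (m + 1) 0 = ((Mc.length : Nat) : Int)
    · have hcondI : ((i : Nat) : Int) < (((m + 1 : Nat)) : Int)
          ∧ PySem.List.pyGetD HV (((m + 1 : Nat)) : Int) 0 = ((Mc.length : Nat) : Int) := by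
        constructor
        · exact_mod_cast hcond.1
        · rw [PySem.List.pyGetD_natCast]
          exact hcond.2
      rw [pvLoop2, dif_pos hcondI]
      have hne : ∀ row ∈ Mc, row ≠ [] := by
        intro row hr hemp
        have := hrows row hr
        rw [hemp] at this
        simp at this
        omega
      have hpb := pvPopBacks_spec Mc [] hne
      simp only [List.length_nil, List.nil_append, Nat.cast_zero, zero_add] at hpb
      rw [hpb]
      have hrest := ih (Mc.map (fun r => r.dropLast)) (by simp)
        (by
          intro row hr
          simp only [List.mem_map] at hr
          obtain ⟨r, hrm, rfl⟩ := hr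
          have := hrows r hrm
          simp [List.length_dropLast]
          omega)
      have hcast : (((m + 1 : Nat)) : Int) - 1 = ((m : Nat) : Int) := by push_cast; ring
      rw [hcast]
      rw [pvRunDn, dif_pos hcond]
      simp only [Nat.add_sub_cancel]
      refine Eq.trans hrest ?_
      simp only [Option.some.injEq, Prod.mk.injEq]
      refine ⟨by congr 1; omega, ?_⟩
      rw [List.map_map]
      apply List.map_congr_left
      intro r _
      simp only [Function.comp, List.length_dropLast, List.dropLast_eq_take, List.take_take,
        List.length_take]
      congr 1
      omega
    · have hcondI : ¬ (((i : Nat) : Int) < (((m + 1 : Nat)) : Int)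
          ∧ PySem.List.pyGetD HV (((m + 1 : Nat)) : Int) 0 = ((Mc.length : Nat) : Int)) := by
        rw [PySem.List.pyGetD_natCast]
        intro hc
        exact hcond ⟨by exact_mod_cast hc.1, hc.2⟩
      rw [pvLoop2, dif_neg hcondI, pvRunDn, dif_neg hcond]
      simp [List.take_length]

theorem pvRunUp_eq (M : List (List Int)) (lv : Int) (n : Nat) :
    ∀ (i : Nat),
      pvRunUp ((List.range n).map (pvSN M)) lv n i
        = (((pvFlags M lv n).drop i).takeWhile id).length := by
  have key : ∀ (k : Nat) (i : Nat), n - i ≤ k →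
      pvRunUp ((List.range n).map (pvSN M)) lv n i
        = (((pvFlags M lv n).drop i).takeWhile id).length := by
    intro k
    induction k with
    | zero =>
      intro i hk
      have hin : n ≤ i := by omega
      rw [pvRunUp, dif_neg (by omega)]
      rw [List.drop_eq_nil_of_le (by simp [pvFlags]; omega)]
      simp
    | succ k ih =>
      intro i hk
      by_cases hi : i < n
      · have hgd : ((List.range n).map (pvSN M)).getD i 0 = pvSN M i := by
          rw [List.getD_eq_getElem _ _ (by simp [hi])]
          simp
        have hfl : i < (pvFlags M lv n).length := by simp [pvFlags, hi]
        have hdrop : (pvFlags M lv n).drop i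
            = decide (pvSN M i = lv) :: (pvFlags M lv n).drop (i + 1) := by
          rw [List.drop_eq_getElem_cons hfl]
          congr 1
          simp [pvFlags]
        by_cases hv : pvSN M i = lv
        · rw [pvRunUp, dif_pos ⟨hi, by rw [hgd]; exact hv⟩, hdrop]
          simp only [List.takeWhile_cons, id_eq, decide_eq_true_eq]
          rw [if_pos hv]
          simp only [List.length_cons]
          rw [ih (i + 1) (by omega)]
        · rw [pvRunUp, dif_neg (by rw [hgd]; tauto), hdrop]
          simp [hv]
      · rw [pvRunUp, dif_neg (by omega)]
        rw [List.drop_eq_nil_of_le (by simp [pvFlags]; omega)]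
        simp
  exact fun i => key (n - i) i (le_refl _)

theorem pvRunDn_gen (HV : List Int) (lv : Int) :
    ∀ (bs : List Bool), (∀ j, j < bs.length → ((HV.getD j 0 = lv) ↔ bs.getD j false = true)) →
      ∀ i, i < bs.length → bs.getD i false = false →
        pvRunDn HV lv i (bs.length - 1) = (bs.reverse.takeWhile id).length := by
  intro bs
  induction bs using List.reverseRecOn with
  | nil => intro _ i hi; simp at hi
  | append_singleton bs' b ih =>
    intro hcond i hi hfi
    have hm : (bs' ++ [b]).length - 1 = bs'.length := by simp
    have hgdm : (bs' ++ [b]).getD bs'.length false = b := by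
      rw [List.getD_append_right _ _ _ _ (le_refl _)]
      simp
    have hcm := hcond bs'.length (by simp)
    rw [hgdm] at hcm
    rw [hm]
    cases b with
    | false =>
      rw [pvRunDn, dif_neg (by
        intro hc
        exact (by simp : (false = true) → False) (hcm.mp hc.2))]
      simp
    | true =>
      have hne : i ≠ bs'.length := by
        intro h
        rw [h, hgdm] at hfi
        simp at hfi
      have hilt : i < bs'.length := by
        simp at hi
        omega
      rw [pvRunDn, dif_pos ⟨hilt, hcm.mpr rfl⟩]
      have hrest := ih
        (fun j hj => by
          have h2 := hcond j (by simp; omega)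
          rwa [List.getD_append _ _ _ _ hj] at h2)
        i hilt (by rwa [List.getD_append _ _ _ _ hilt] at hfi)
      rw [hrest]
      simp

theorem pvRunDn_eq (M : List (List Int)) (lv : Int) (n : Nat) (i : Nat)
    (hi : i < n) (hfi : (pvFlags M lv n).getD i false = false) :
    pvRunDn ((List.range n).map (pvSN M)) lv i (n - 1)
      = ((pvFlags M lv n).reverse.takeWhile id).length := by
  have hlen : (pvFlags M lv n).length = n := by simp [pvFlags]
  have hc : ∀ j, j < (pvFlags M lv n).length →
      ((((List.range n).map (pvSN M)).getD j 0 = lv) ↔ (pvFlags M lv n).getD j false = true) := by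
    intro j hj
    rw [hlen] at hj
    rw [List.getD_eq_getElem _ _ (by simp [hj]), List.getD_eq_getElem _ _ (by rw [hlen]; exact hj)]
    simp [pvFlags]
  have hres := pvRunDn_gen _ lv (pvFlags M lv n) hc i (by rw [hlen]; exact hi) hfi
  rw [hlen] at hres
  exact hres

theorem pvTrailing_le (bs : List Bool) (i : Nat) (hi : i < bs.length)
    (hfi : bs.getD i false = false) :
    (bs.reverse.takeWhile id).length ≤ bs.length - 1 - i := by
  by_contra hk
  push Not at hk
  have hlen : (bs.reverse.takeWhile id).length ≤ bs.length := by
    simpa using (List.takeWhile_prefix (l := bs.reverse) (p := id)).length_le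
  have hj : bs.length - 1 - i < bs.reverse.length := by simp; omega
  have hpref := List.takeWhile_prefix (l := bs.reverse) (p := id)
  have hget : (bs.reverse.takeWhile id)[bs.length - 1 - i]'(by omega)
      = bs.reverse[bs.length - 1 - i]'hj := hpref.getElem (by omega)
  have hmem : (bs.reverse.takeWhile id)[bs.length - 1 - i]'(by omega) ∈ bs.reverse.takeWhile id :=
    List.getElem_mem _
  have htrue := List.mem_takeWhile_imp hmem
  rw [hget] at htrue
  have hrev : bs.reverse[bs.length - 1 - i]'hj = bs[i]'hi := by
    rw [List.getElem_reverse]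
    congr 1
    omega
  rw [hrev] at htrue
  rw [List.getD_eq_getElem bs false hi] at hfi
  simp [id] at htrue
  rw [htrue] at hfi
  exact Bool.true_eq_false.mp hfi

theorem pvFlagFalse (bs : List Bool) (h : (bs.takeWhile id).length < bs.length) :
    bs.getD (bs.takeWhile id).length false = false := by
  induction bs with
  | nil => simp at h
  | cons b bs ih =>
    cases b
    · simp
    · simp at h ⊢
      exact ih (by omega)

theorem pvColSum_spec (M : List (List Int)) (n : Nat) (hrows : ∀ row ∈ M, n ≤ row.length)
    (c : Int) (h0 : 0 ≤ c) (hc : c < (n : Int)) :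
    pvColSum M c = some (pvS M c) := by
  unfold pvColSum
  rw [pvFoldlM_some _ (fun s row => s + PySem.Int.floordiv (PySem.List.pyGetD row c 0) 255) M 0 ?_]
  · rw [PySem.List.foldl_add]
    simp [pvS]
  · intro row hr acc
    have hcr : c < (row.length : Int) := by
      have := hrows row hr
      omega
    rw [PySem.List.pyGet?_eq_some_getElem row h0 hcr]
    simp only [PySem.List.pyGetD_eq_getElem row 0 h0 hcr]

theorem pvWhiteAt_spec (M : List (List Int)) (lv : Int) (n : Nat)
    (hrows : ∀ row ∈ M, n ≤ row.length) (c : Nat) (hc : c < n) :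
    pvWhiteAt M lv ((c : Nat) : Int) = some ((pvFlags M lv n).getD c false) := by
  unfold pvWhiteAt
  rw [pvColSum_spec M n hrows _ (by positivity) (by exact_mod_cast hc)]
  congr 1
  rw [List.getD_eq_getElem _ _ (by simp [pvFlags, hc])]
  simp [pvFlags, pvSN]

theorem pvAltLead_spec (M : List (List Int)) (lv : Int) (n : Nat)
    (hrows : ∀ row ∈ M, n ≤ row.length) :
    ∀ (i : Nat), i ≤ n →
      pvAltLead M lv ((n : Nat) : Int) ((i : Nat) : Int)
        = some (((i + (((pvFlags M lv n).drop i).takeWhile id).length : Nat)) : Int) := by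
  have key : ∀ (k : Nat) (i : Nat), i ≤ n → n - i ≤ k →
      pvAltLead M lv ((n : Nat) : Int) ((i : Nat) : Int)
        = some (((i + (((pvFlags M lv n).drop i).takeWhile id).length : Nat)) : Int) := by
    intro k
    induction k with
    | zero =>
      intro i hi hk
      have hin : i = n := by omega
      rw [pvAltLead, dif_neg (by omega)]
      rw [List.drop_eq_nil_of_le (by simp [pvFlags]; omega)]
      simp
    | succ k ih =>
      intro i hi hk
      by_cases hilt : i < n
      · rw [pvAltLead, dif_pos (by exact_mod_cast hilt)]
        rw [pvWhiteAt_spec M lv n hrows i hilt]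
        have hfl : i < (pvFlags M lv n).length := by simp [pvFlags, hilt]
        have hdrop : (pvFlags M lv n).drop i
            = (pvFlags M lv n).getD i false :: (pvFlags M lv n).drop (i + 1) := by
          rw [List.drop_eq_getElem_cons hfl, List.getD_eq_getElem _ _ hfl]
        by_cases hw : (pvFlags M lv n).getD i false = true
        · rw [hw]
          have hrest := ih (i + 1) (by omega) (by omega)
          have hcast : ((i : Int) + 1) = (((i + 1 : Nat)) : Int) := by push_cast; ring
          rw [hcast, hrest, hdrop, hw]
          simp only [Option.some.injEq]
          have hlen1 : (List.takeWhile id (true :: (pvFlags M lv n).drop (i + 1))).length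
              = (List.takeWhile id ((pvFlags M lv n).drop (i + 1))).length + 1 := by simp
          rw [hlen1]
          omega
        · simp only [Bool.not_eq_true] at hw
          rw [hw, hdrop, hw]
          simp
      · rw [pvAltLead, dif_neg (by omega)]
        rw [List.drop_eq_nil_of_le (by simp [pvFlags]; omega)]
        simp
  exact fun i hi => key (n - i) i hi (le_refl _)

theorem pvAltTrail_spec (M : List (List Int)) (lv : Int) (n : Nat)
    (hrows : ∀ row ∈ M, n ≤ row.length) (tN : Nat) (htlt : tN < n)
    (hfl : (pvFlags M lv n).getD tN false = false) :
    pvAltTrail M lv (((n - 1 - tN : Nat)) : Int) ((n : Nat) : Int) ((0 : Nat) : Int)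
      = some ((((pvFlags M lv n).reverse.takeWhile id).length : Nat) : Int) := by
  have hflen : (pvFlags M lv n).length = n := by simp [pvFlags]
  have hkle : ((pvFlags M lv n).reverse.takeWhile id).length ≤ n - 1 - tN := by
    have := pvTrailing_le (pvFlags M lv n) tN (by omega) hfl
    rwa [hflen] at this
  have key : ∀ (d : Nat) (k : Nat), k ≤ ((pvFlags M lv n).reverse.takeWhile id).length →
      ((pvFlags M lv n).reverse.takeWhile id).length - k ≤ d →
      pvAltTrail M lv (((n - 1 - tN : Nat)) : Int) ((n : Nat) : Int) ((k : Nat) : Int)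
        = some ((((pvFlags M lv n).reverse.takeWhile id).length : Nat) : Int) := by
    intro d
    induction d with
    | zero =>
      intro k hk hd
      have hkk : k = ((pvFlags M lv n).reverse.takeWhile id).length := by omega
      by_cases hb : k < n - 1 - tN
      · rw [pvAltTrail, dif_pos (by exact_mod_cast hb)]
        have hcast : ((n : Int) - 1 - (k : Int)) = (((n - 1 - k : Nat)) : Int) := by omega
        rw [hcast, pvWhiteAt_spec M lv n hrows (n - 1 - k) (by omega)]
        have hrevk : (pvFlags M lv n).getD (n - 1 - k) false
            = (pvFlags M lv n).reverse.getD k false := by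
          rw [List.getD_eq_getElem _ _ (by omega), List.getD_eq_getElem _ _ (by simp [hflen]; omega)]
          rw [List.getElem_reverse]
          congr 1
          omega
        rw [hrevk, hkk, pvFlagFalse (pvFlags M lv n).reverse (by simp [hflen]; omega)]
      · rw [pvAltTrail, dif_neg (by omega), hkk]
    | succ d ih =>
      intro k hk hd
      by_cases hkk : k < ((pvFlags M lv n).reverse.takeWhile id).length
      · have hb : k < n - 1 - tN := by omega
        rw [pvAltTrail, dif_pos (by exact_mod_cast hb)]
        have hcast : ((n : Int) - 1 - (k : Int)) = (((n - 1 - k : Nat)) : Int) := by omega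
        rw [hcast, pvWhiteAt_spec M lv n hrows (n - 1 - k) (by omega)]
        have hrevlen : k < (pvFlags M lv n).reverse.length := by simp [hflen]; omega
        have hpref := List.takeWhile_prefix (l := (pvFlags M lv n).reverse) (p := id)
        have hget : ((pvFlags M lv n).reverse.takeWhile id)[k]'(by omega)
            = (pvFlags M lv n).reverse[k]'hrevlen := hpref.getElem (by omega)
        have hmem : ((pvFlags M lv n).reverse.takeWhile id)[k]'(by omega)
            ∈ (pvFlags M lv n).reverse.takeWhile id := List.getElem_mem _
        have htrue := List.mem_takeWhile_imp hmem
        rw [hget] at htrue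
        simp only [id_eq] at htrue
        have hrevk : (pvFlags M lv n).getD (n - 1 - k) false = true := by
          rw [List.getD_eq_getElem _ _ (by omega)]
          rw [← htrue, List.getElem_reverse]
          congr 1
          omega
        rw [hrevk]
        have hcast2 : ((k : Int) + 1) = (((k + 1 : Nat)) : Int) := by push_cast; ring
        rw [hcast2]
        exact ih (k + 1) (by omega) (by omega)
      · exact ih k hk (by omega)
  exact key (((pvFlags M lv n).reverse.takeWhile id).length) 0 (by omega) (by omega)

-- ===== VERDICT (by name: the statement is the Claim_ definition above) =====
theorem wipe_vertical_spec : Claim_equal_wipe_vertical := by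
  intro M _hdom hpre
  obtain ⟨hne0, hrows0⟩ := hpre
  obtain ⟨r0, rs, rfl⟩ : ∃ r0 rs, M = r0 :: rs := by
    cases M with
    | nil => exact absurd rfl hne0
    | cons a l => exact ⟨a, l, rfl⟩
  have hrows : ∀ row ∈ r0 :: rs, r0.length ≤ row.length := by
    simpa using hrows0
  unfold Spec_wipe_vertical wipe_vertical wipe_vertical_alt
  rw [PySem.List.pyGet?_zero_cons]
  dsimp only
  rw [pvHist r0.length]
  have hhv := pvHVGo_spec (r0 :: rs) r0.length hrows 0 (by omega)
  simp only [List.range_zero, List.map_nil, List.nil_append, Nat.cast_zero, Nat.sub_zero] at hhv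
  rw [hhv]
  dsimp only
  have hl1 := pvLoop1_spec ((List.range r0.length).map (pvSN (r0 :: rs))) r0.length 0
    ((r0.length : Nat) : Int) (r0 :: rs) (by omega) (by simpa using hrows)
  simp only [Nat.cast_zero, Nat.zero_add] at hl1
  rw [hl1]
  dsimp only
  set lv : Int := (((r0 :: rs).length : Nat) : Int) with hlv
  set flags : List Bool := pvFlags (r0 :: rs) lv r0.length with hflags
  have htEq : pvRunUp ((List.range r0.length).map (pvSN (r0 :: rs))) lv r0.length 0
      = (flags.takeWhile id).length := by
    rw [pvRunUp_eq, List.drop_zero]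
  set tN : Nat := (flags.takeWhile id).length with htN
  rw [htEq]
  have hlead := pvAltLead_spec (r0 :: rs) lv r0.length hrows 0 (by omega)
  simp only [Nat.cast_zero, Nat.zero_add, List.drop_zero, ← hflags, ← htN] at hlead
  rw [hlead]
  dsimp only
  have hflen : flags.length = r0.length := by simp [hflags, pvFlags]
  have htle : tN ≤ r0.length := by
    rw [htN, ← hflen]
    exact (List.takeWhile_prefix (l := flags) (p := id)).length_le
  by_cases ht : tN = r0.length
  · rw [if_pos (by exact_mod_cast ht), if_pos (by exact_mod_cast ht)]
  · have htlt : tN < r0.length := by omega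
    rw [if_neg (by exact_mod_cast ht), if_neg (by exact_mod_cast ht)]
    have hfl : flags.getD tN false = false := by
      rw [htN]
      exact pvFlagFalse flags (by rw [hflen]; exact htlt)
    have hcast1 : ((r0.length : Int) - 1) = (((r0.length - 1 : Nat)) : Int) := by omega
    rw [hcast1]
    have hl2 := pvLoop2_spec ((List.range r0.length).map (pvSN (r0 :: rs))) lv tN (r0.length - 1)
      ((r0 :: rs).map (fun r => r.drop tN)) (by simp [hlv])
      (by
        intro row hr
        simp only [List.mem_map] at hr
        obtain ⟨r, hrm, rfl⟩ := hr
        have := hrows r hrm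
        simp [List.length_drop]
        omega)
    rw [hl2]
    dsimp only
    have hkEq : pvRunDn ((List.range r0.length).map (pvSN (r0 :: rs))) lv tN (r0.length - 1)
        = (flags.reverse.takeWhile id).length := pvRunDn_eq (r0 :: rs) lv r0.length tN htlt hfl
    set kN : Nat := (flags.reverse.takeWhile id).length with hkN
    rw [hkEq]
    have hcast2 : ((((r0.length - 1 : Nat)) : Int) - (tN : Int)) = (((r0.length - 1 - tN : Nat)) : Int) := by
      omega
    rw [hcast2]
    have htrail := pvAltTrail_spec (r0 :: rs) lv r0.length hrows tN htlt hfl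
    simp only [Nat.cast_zero, ← hflags, ← hkN] at htrail
    rw [htrail]
    dsimp only
    have hkle : kN ≤ r0.length - 1 - tN := by
      rw [hkN]
      have := pvTrailing_le flags tN (by rw [hflen]; exact htlt) hfl
      rwa [hflen] at this
    congr 1
    rw [List.map_map]
    apply List.map_congr_left
    intro r hrm
    have hrlen : r0.length ≤ r.length := hrows r hrm
    have h0k : (0 : Int) ≤ (r.length : Int) - (kN : Int) := by omega
    rw [PySem.List.slice_toNat r (by positivity) h0k]
    have htoNat : ((r.length : Int) - (kN : Int)).toNat = r.length - kN := by omega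
    rw [htoNat]
    simp only [Function.comp, List.length_drop, Int.toNat_natCast]
    congr 1
    omega
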